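-- pv_equiv track=rewrite | github.com/kowalowy1234/met-in-wiedzy | metryka_dystans.py | shortestDistances
-- ===== SOURCE A (Python) =====
-- def shortestDistances(dict, x):
--     for i in range(len(dict)):
--         dict[i] = sorted(dict[i])
--         dict[i] = dict[i][:x]
--         sum = 0
--         for j in range(len(dict[i])):
--             sum += dict[i][j]
--         dict[i] = sum
--     return dict
-- ===== SOURCE B (Python) =====
-- def shortestDistances(dict, x):
--     def sum_smallest(row, k):
--         # sum of the k smallest elements of row (0 <= k <= len(row)),
--         # by three-way-partition quickselect instead of sorting
--         if k <= 0:
--             return 0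
--         if k >= len(row):
--             return sum(row)
--         p = row[0]
--         less = [v for v in row if v < p]
--         if k <= len(less):
--             return sum_smallest(less, k)
--         equal = [v for v in row if v == p]
--         if k <= len(less) + len(equal):
--             return sum(less) + (k - len(less)) * p
--         greater = [v for v in row if v > p]
--         return sum(less) + len(equal) * p + sum_smallest(greater, k - len(less) - len(equal))
--
--     out = []
--     for row in dict:
--         k = x if x >= 0 else len(row) + x
--         out.append(sum_smallest(row, max(0, min(k, len(row)))))
--     return out
-- ===== Notes on version B (the rewrite author's own statement) =====
-- stated objective: faster
-- what changed: A sorts every row and sums a slice; B computes each row's sum of its k smallest elements by recursive three-way-partition quickselect (no sorting), deriving k from the slice bound, and never mutates the input (A rebinds rows in place).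
import Mathlib
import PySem

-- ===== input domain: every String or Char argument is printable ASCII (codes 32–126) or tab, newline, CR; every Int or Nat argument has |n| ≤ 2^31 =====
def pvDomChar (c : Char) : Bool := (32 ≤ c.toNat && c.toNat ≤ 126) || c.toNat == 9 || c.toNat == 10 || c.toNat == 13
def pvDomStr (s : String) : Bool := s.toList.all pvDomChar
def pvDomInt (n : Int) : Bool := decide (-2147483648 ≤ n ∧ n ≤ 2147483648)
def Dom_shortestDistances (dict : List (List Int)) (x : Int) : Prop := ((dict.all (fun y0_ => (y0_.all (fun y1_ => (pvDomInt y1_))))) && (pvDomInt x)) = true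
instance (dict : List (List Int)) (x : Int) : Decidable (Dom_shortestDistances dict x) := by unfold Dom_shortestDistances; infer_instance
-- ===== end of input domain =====

-- B replaces sort-then-slice-then-sum per row by a three-way-partition quickselect sum of the
-- k smallest elements (objective: faster on average, no per-row sort). Equivalence is about the
-- RETURN value only: Python A mutates its argument list in place, B does not.

-- ===== PORT A =====
def shortestDistances (dict : List (List Int)) (x : Int) : List Int :=
  dict.map (fun row =>
    -- dict[i] = sorted(dict[i]); dict[i] = dict[i][:x]
    let t := PySem.List.slice (PySem.List.sorted row (fun v => v) false) none (some x)
    -- sum = 0; for j in range(len(dict[i])): sum += dict[i][j]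
    (PySem.List.pyRange 0 (t.length : Int) 1).foldl (fun sum j => sum + PySem.List.pyGetD t j 0) 0)

-- ===== PORT B =====
-- sum of the k smallest elements of row, by three-way-partition quickselect (Source B's sum_smallest)
def sumSmallest (row : List Int) (k : Int) : Int :=
  if k ≤ 0 then 0
  else if (row.length : Int) ≤ k then row.sum
  else
    match row with
    | [] => 0
    | p :: t =>
      let less := (p :: t).filter (fun v => decide (v < p))
      if k ≤ (less.length : Int) then sumSmallest less k
      else
        let equal := (p :: t).filter (fun v => decide (v = p))
        if k ≤ (less.length : Int) + (equal.length : Int) then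
          less.sum + (k - less.length) * p
        else
          let greater := (p :: t).filter (fun v => decide (p < v))
          less.sum + (equal.length : Int) * p +
            sumSmallest greater (k - less.length - equal.length)
termination_by row.length
decreasing_by
  · have := List.length_filter_le (fun v => decide (v < p)) t
    simp only [List.filter_cons, decide_eq_true_eq, lt_irrefl, if_false, List.length_cons]
    simpa using Nat.lt_succ_of_le this
  · have := List.length_filter_le (fun v => decide (p < v)) t
    simp only [List.filter_cons, decide_eq_true_eq, lt_irrefl, if_false, List.length_cons]
    simpa using Nat.lt_succ_of_le this

def shortestDistances_alt (dict : List (List Int)) (x : Int) : List Int :=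
  dict.foldl (fun out row =>
    let k := if 0 ≤ x then x else (row.length : Int) + x
    out ++ [sumSmallest row (max 0 (min k (row.length : Int)))]) []

-- ===== PRECONDITION & SPEC =====
def Spec_shortestDistances (dict : List (List Int)) (x : Int) (out : List Int) : Prop := out = shortestDistances_alt dict x
instance (dict : List (List Int)) (x : Int) (out : List Int) : Decidable (Spec_shortestDistances dict x out) := by unfold Spec_shortestDistances; infer_instance

-- ===== CLAIM (what is proved, stated in full; the proofs are below) =====
def Claim_equal_shortestDistances : Prop := ∀ (dict : List (List Int)) (x : Int), Dom_shortestDistances dict x → Spec_shortestDistances dict x (shortestDistances dict x)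

-- ===== LEMMAS AND PROOFS =====

-- the three partition filters rearrange the list
lemma filter_three_perm (p : Int) (l : List Int) :
    (l.filter (fun v => decide (v < p)) ++ l.filter (fun v => decide (v = p)) ++
      l.filter (fun v => decide (p < v))).Perm l := by
  induction l with
  | nil => simp
  | cons a l ih =>
    rcases lt_trichotomy a p with h | h | h
    · have h2 : ¬ (a = p) := by omega
      have h3 : ¬ (p < a) := by omega
      simp only [List.filter_cons, h, h2, h3, decide_true, decide_false, if_true,
        Bool.false_eq_true, if_false, List.cons_append]
      exact ih.cons a
    · subst h
      simp only [List.filter_cons, lt_irrefl, decide_true, decide_false, if_true,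
        Bool.false_eq_true, if_false]
      refine (List.perm_middle.append_right _).trans ?_
      rw [List.cons_append]
      exact ih.cons a
    · have h2 : ¬ (a < p) := by omega
      have h3 : ¬ (a = p) := by omega
      simp only [List.filter_cons, h, h2, h3, decide_true, decide_false, if_true,
        Bool.false_eq_true, if_false, List.append_assoc]
      rw [← List.append_assoc]
      refine List.perm_middle.trans ?_
      exact ih.cons a

-- sorted l splits as sorted(less) ++ equal ++ sorted(greater)
lemma sorted_decomp (p : Int) (l : List Int) :
    PySem.List.sorted l (fun v => v) false =
      PySem.List.sorted (l.filter (fun v => decide (v < p))) (fun v => v) false ++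
      l.filter (fun v => decide (v = p)) ++
      PySem.List.sorted (l.filter (fun v => decide (p < v))) (fun v => v) false := by
  apply PySem.List.sorted_id_eq_of_perm_of_pairwise
  · refine List.Perm.trans ?_ (filter_three_perm p l)
    exact ((PySem.List.sorted_perm _ _ _).append (List.Perm.refl _)).append
      (PySem.List.sorted_perm _ _ _)
  · have hL : ∀ a ∈ PySem.List.sorted (l.filter (fun v => decide (v < p))) (fun v => v) false,
        a < p := by
      intro a ha
      rw [PySem.List.mem_sorted] at ha
      simpa using (List.mem_filter.mp ha).2
    have hE : ∀ a ∈ l.filter (fun v => decide (v = p)), a = p := by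
      intro a ha; simpa using (List.mem_filter.mp ha).2
    have hG : ∀ a ∈ PySem.List.sorted (l.filter (fun v => decide (p < v))) (fun v => v) false,
        p < a := by
      intro a ha
      rw [PySem.List.mem_sorted] at ha
      simpa using (List.mem_filter.mp ha).2
    rw [List.pairwise_append, List.pairwise_append]
    refine ⟨⟨PySem.List.sorted_pairwise _ _, ?_, ?_⟩, PySem.List.sorted_pairwise _ _, ?_⟩
    · have := List.eq_replicate_of_mem hE
      rw [this]; exact List.pairwise_replicate.mpr (Or.inr le_rfl)
    · intro a ha b hb
      have := hL a ha; have := hE b hb; omega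
    · intro a ha b hb
      rcases List.mem_append.mp ha with ha | ha
      · have := hL a ha; have := hG b hb; omega
      · have := hE a ha; have := hG b hb; omega

lemma sumSmallest_eq (row : List Int) (k : Int) :
    sumSmallest row k = ((PySem.List.sorted row (fun v => v) false).take k.toNat).sum := by
  fun_induction sumSmallest row k
  case case1 k h =>
    simp [Int.toNat_of_nonpos h]
  case case2 row k h1 h2 =>
    rw [List.take_of_length_le (by simp; omega), (PySem.List.sorted_perm _ _ _).sum_eq]
  case case3 k h1 h2 =>
    simp at h2; omega
  case case4 k hk0 p t less hkless hlen ih =>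
    have e1 : less.length = (List.filter (fun v => decide (v < p)) (p :: t)).length := rfl
    have h0 : k.toNat - (List.filter (fun v => decide (v < p)) (p :: t)).length = 0 := by omega
    have h1 : k.toNat - ((List.filter (fun v => decide (v < p)) (p :: t)).length
        + (List.filter (fun v => decide (v = p)) (p :: t)).length) = 0 := by omega
    rw [sorted_decomp p (p :: t), ih, List.take_append, List.take_append]
    simp only [PySem.List.length_sorted, List.length_append, h0, h1, List.take_zero,
      List.append_nil]
    rfl
  case case5 k hk0 p t less hnl equal hkle hlen =>
    have e1 : less.length = (List.filter (fun v => decide (v < p)) (p :: t)).length := rfl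
    have e2 : equal.length = (List.filter (fun v => decide (v = p)) (p :: t)).length := rfl
    have hE : List.filter (fun v => decide (v = p)) (p :: t) =
        List.replicate (List.filter (fun v => decide (v = p)) (p :: t)).length p := by
      refine List.eq_replicate_of_mem ?_
      intro b hb; simpa using (List.mem_filter.mp hb).2
    have h0 : k.toNat - ((List.filter (fun v => decide (v < p)) (p :: t)).length
        + (List.filter (fun v => decide (v = p)) (p :: t)).length) = 0 := by omega
    rw [sorted_decomp p (p :: t), List.take_append, List.take_append]
    rw [List.take_of_length_le (by rw [PySem.List.length_sorted]; omega)]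
    conv_lhs => rw [← (PySem.List.sorted_perm (List.filter (fun v => decide (v < p)) (p :: t)) (fun v => v) false).sum_eq]
    simp only [PySem.List.length_sorted, List.length_append, h0, List.take_zero,
      List.append_nil, List.sum_append]
    conv_rhs => rw [hE, List.take_replicate, List.sum_replicate]
    have hmin : min (k.toNat - (List.filter (fun v => decide (v < p)) (p :: t)).length)
        (List.filter (fun v => decide (v = p)) (p :: t)).length
        = k.toNat - (List.filter (fun v => decide (v < p)) (p :: t)).length := by omega
    rw [hmin, nsmul_eq_mul]
    have hc : ((k.toNat - (List.filter (fun v => decide (v < p)) (p :: t)).length : Nat) : Int)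
        = k - (List.filter (fun v => decide (v < p)) (p :: t)).length := by omega
    rw [hc]
  case case6 k hk0 p t less hnl equal hne greater hlen ih =>
    simp only [less, equal, greater] at ih ⊢
    have e1 : less.length = (List.filter (fun v => decide (v < p)) (p :: t)).length := rfl
    have e2 : equal.length = (List.filter (fun v => decide (v = p)) (p :: t)).length := rfl
    have hE : ∀ b ∈ List.filter (fun v => decide (v = p)) (p :: t), b = p := by
      intro b hb; simpa using (List.mem_filter.mp hb).2
    rw [sorted_decomp p (p :: t), List.take_append, List.take_append]
    rw [List.take_of_length_le (by rw [PySem.List.length_sorted]; omega)]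
    rw [List.take_of_length_le (by rw [PySem.List.length_sorted]; omega)]
    rw [ih]
    simp only [PySem.List.length_sorted, List.length_append, List.sum_append]
    rw [(PySem.List.sorted_perm (List.filter (fun v => decide (v < p)) (p :: t)) (fun v => v) false).sum_eq]
    conv_rhs => rw [List.eq_replicate_of_mem hE, List.sum_replicate]
    rw [nsmul_eq_mul]
    have harg : (k - (less.length : Int) - (equal.length : Int)).toNat
        = k.toNat - (List.filter (fun v => decide (v < p)) (p :: t)).length
          - (List.filter (fun v => decide (v = p)) (p :: t)).length := by omega
    rw [harg, List.length_replicate, Nat.sub_sub]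

-- per-row: A's sort+slice+index-sum equals B's clamped quickselect sum
lemma row_eq (row : List Int) (x : Int) :
    (let t := PySem.List.slice (PySem.List.sorted row (fun v => v) false) none (some x)
     (PySem.List.pyRange 0 (t.length : Int) 1).foldl (fun sum j => sum + PySem.List.pyGetD t j 0) 0)
    = (let k := if 0 ≤ x then x else (row.length : Int) + x
       sumSmallest row (max 0 (min k (row.length : Int)))) := by
  simp only []
  rw [PySem.List.foldl_pyRange_zero_pyGetD' _ 0 (fun a b => a + b) 0, sumSmallest_eq,
    ← List.sum_eq_foldl]
  congr 1
  by_cases hx : 0 ≤ x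
  · rw [show x = ((x.toNat : Nat) : Int) by omega, PySem.List.slice_to_natCast]
    by_cases hle : x.toNat ≤ (PySem.List.sorted row (fun v => v) false).length
    · congr 1
      simp [PySem.List.length_sorted] at hle ⊢
      omega
    · rw [List.take_of_length_le (by omega), List.take_of_length_le]
      simp [PySem.List.length_sorted] at hle ⊢
      omega
  · have hk : 0 < (-x).toNat := by omega
    rw [show x = -(((-x).toNat : Nat) : Int) by omega,
      PySem.List.slice_to_neg_natCast _ _ hk]
    congr 1
    simp [PySem.List.length_sorted]
    omega

-- ===== VERDICT (by name: the statement is the Claim_ definition above) =====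
theorem shortestDistances_spec : Claim_equal_shortestDistances := by
  intro dict x _
  unfold Spec_shortestDistances shortestDistances shortestDistances_alt
  rw [PySem.List.foldl_append_singleton_eq_map]
  exact List.map_congr_left (fun row _ => row_eq row x)
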